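-- pv_equiv track=rewrite | github.com/wieon/Learning | Python/045_奇数阶幻方.py | magic_square
-- ===== SOURCE A (Python) =====
-- def magic_square(n):
--     m = [[0 for i in range(n)] for i in range(n)]
--     row, col = 0, n//2
--     for i in range(1, n**2+1):
--         m[row][col] = i
--         rowa = row - 1  # 如果这里没有另设一个数就会算错
--         cola = col + 1  # 另设一个数表示假设情况
--         if rowa < 0:  # 移动情况
--             rowa = n-1
--         if cola > n-1:
--             cola = 0
--         if m[rowa][cola] != 0:  # 占位情况
--             row = row + 1
--             if row > n-1:
--                 row = 0
--         else:  # 最右上角的那种情况，由于左下角已经有数了，所以相当于占位情况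
--             row, col = rowa, cola
--     return m
-- ===== SOURCE B (Python) =====
-- def magic_square(n):
--     m = [[0] * n for _ in range(n)]
--     for t in range(n * n):
--         g = t // n
--         p = t % n
--         m[(2 * g - p) % n][(n // 2 - g + p) % n] = t + 1
--     return m
-- ===== Notes on version B (the rewrite author's own statement) =====
-- stated objective: simpler
-- what changed: replaces the move-and-collide state machine (carry row/col, read the target cell, branch on occupancy) with a stateless closed-form placement: each number goes directly to a position computed directly from t by floor-division, remainder and modular arithmetic
import Mathlib
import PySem

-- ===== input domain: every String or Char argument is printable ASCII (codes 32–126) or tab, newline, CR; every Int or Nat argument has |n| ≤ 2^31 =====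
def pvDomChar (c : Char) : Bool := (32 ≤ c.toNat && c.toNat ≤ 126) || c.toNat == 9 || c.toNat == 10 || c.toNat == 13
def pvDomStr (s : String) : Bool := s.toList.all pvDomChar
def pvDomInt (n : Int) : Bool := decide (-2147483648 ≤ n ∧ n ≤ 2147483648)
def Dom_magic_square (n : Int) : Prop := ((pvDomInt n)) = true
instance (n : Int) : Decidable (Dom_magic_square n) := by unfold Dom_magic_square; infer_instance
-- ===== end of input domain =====

-- B replaces A's move-and-collide state machine with closed-form placement of each number; proved equal on all nonnegative n (A raises IndexError on negative n).


-- ===== PORT A =====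
-- m[row][col] = i  (row/col always in range under Pre_): fetch the row, set the cell, set the row back
def pvSet2 (m : List (List Int)) (r c v : Int) : List (List Int) :=
  PySem.List.pySetD m r (PySem.List.pySetD (PySem.List.pyGetD m r []) c v)

def pvStepA (n : Int) (st : List (List Int) × Int × Int) (i : Int) : List (List Int) × Int × Int :=
  let m := pvSet2 st.1 st.2.1 st.2.2 i
  let rowa := st.2.1 - 1
  let cola := st.2.2 + 1
  let rowa := if rowa < 0 then n - 1 else rowa
  let cola := if cola > n - 1 then 0 else cola
  if PySem.List.pyGetD (PySem.List.pyGetD m rowa []) cola 0 ≠ 0 then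
    let row := st.2.1 + 1
    let row := if row > n - 1 then 0 else row
    (m, row, st.2.2)
  else
    (m, rowa, cola)

def magic_square (n : Int) : List (List Int) :=
  let m0 := (PySem.List.pyRange 0 n 1).map (fun _ => (PySem.List.pyRange 0 n 1).map (fun _ => (0 : Int)))
  ((PySem.List.pyRange 1 (n ^ 2 + 1) 1).foldl (pvStepA n) (m0, 0, PySem.Int.floordiv n 2)).1

-- ===== PORT B =====
def pvStepB (n : Int) (m : List (List Int)) (t : Int) : List (List Int) :=
  let g := PySem.Int.floordiv t n
  let p := PySem.Int.mod t n
  pvSet2 m (PySem.Int.mod (2 * g - p) n) (PySem.Int.mod (PySem.Int.floordiv n 2 - g + p) n) (t + 1)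

def magic_square_alt (n : Int) : List (List Int) :=
  -- [0] * n is the empty list for n ≤ 0, exactly List.replicate n.toNat 0
  let m0 := (PySem.List.pyRange 0 n 1).map (fun _ => List.replicate n.toNat (0 : Int))
  (PySem.List.pyRange 0 (n * n) 1).foldl (pvStepB n) m0

-- ===== PRECONDITION & SPEC =====
-- A raises IndexError on negative n (the first m[row][col] assignment hits the empty grid); total on nonnegative n.
def Pre_magic_square (n : Int) : Prop := 0 ≤ n
instance (n : Int) : Decidable (Pre_magic_square n) := by unfold Pre_magic_square; infer_instance
def pvWitness_magic_square : Int := (3)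

def Spec_magic_square (n : Int) (out : List (List Int)) : Prop := out = magic_square_alt n
instance (n : Int) (out : List (List Int)) : Decidable (Spec_magic_square n out) := by unfold Spec_magic_square; infer_instance

-- ===== CLAIM (what is proved, stated in full; the proofs are below) =====
def Claim_equal_magic_square : Prop := ∀ (n : Int), Dom_magic_square n → Pre_magic_square n → Spec_magic_square n (magic_square n)

-- ===== LEMMAS AND PROOFS =====

-- position of number k+1 in the closed form
def pvPosR (n k : Int) : Int := (2 * (k / n) - k % n) % n
def pvPosC (n k : Int) : Int := (n / 2 - k / n + k % n) % n
-- inverse of the position map on the grid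
def pvInv (n r c : Int) : Int :=
  (r + c - n / 2) % n * n + (c - n / 2 + (r + c - n / 2) % n) % n
-- B's grid after the first k iterations
def pvGrid (n : Int) (k : Nat) : List (List Int) :=
  (PySem.List.pyRange 0 (k : Int) 1).foldl (pvStepB n)
    ((PySem.List.pyRange 0 n 1).map (fun _ => List.replicate n.toNat (0 : Int)))
def pvEntry (m : List (List Int)) (r c : Int) : Int :=
  PySem.List.pyGetD (PySem.List.pyGetD m r []) c 0

lemma pvEmodEq {n x y : Int} (hy0 : 0 ≤ y) (hyn : y < n) (h : n ∣ x - y) : x % n = y := by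
  obtain ⟨t, ht⟩ := h
  have hx : x = y + n * t := by linarith
  subst hx
  rw [Int.add_mul_emod_self_left]
  exact Int.emod_eq_of_lt hy0 hyn

lemma pvStepB_eq (n t : Int) (hn : 0 < n) (m : List (List Int)) :
    pvStepB n m t = pvSet2 m (pvPosR n t) (pvPosC n t) (t + 1) := by
  simp only [pvStepB, pvPosR, pvPosC, PySem.Int.floordiv_eq_ediv_of_pos hn,
    PySem.Int.mod_eq_emod_of_pos hn, PySem.Int.floordiv_eq_ediv_of_pos (show (0:Int) < 2 by norm_num)]

lemma pvPos_inv (n r c : Int) (hn : 0 < n) (hr0 : 0 ≤ r) (hrn : r < n) (hc0 : 0 ≤ c) (hcn : c < n) :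
    pvPosR n (pvInv n r c) = r ∧ pvPosC n (pvInv n r c) = c ∧ 0 ≤ pvInv n r c ∧ pvInv n r c < n * n := by
  have hne : n ≠ 0 := by omega
  set h := n / 2 with hh
  set g := (r + c - h) % n with hg
  set p := (c - h + g) % n with hp
  have hg0 : 0 ≤ g := Int.emod_nonneg _ hne
  have hgn : g < n := Int.emod_lt_of_pos _ hn
  have hp0 : 0 ≤ p := Int.emod_nonneg _ hne
  have hpn : p < n := Int.emod_lt_of_pos _ hn
  have hu : g = (r + c - h) - n * ((r + c - h) / n) := by rw [hg, Int.emod_def]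
  have hv : p = (c - h + g) - n * ((c - h + g) / n) := by rw [hp, Int.emod_def]
  have hinv : pvInv n r c = g * n + p := rfl
  have hdiv : (g * n + p) / n = g := by
    rw [add_comm, Int.add_mul_ediv_right _ _ hne, Int.ediv_eq_zero_of_lt hp0 hpn, zero_add]
  have hmod : (g * n + p) % n = p := by
    rw [add_comm, Int.add_mul_emod_self_right]
    exact Int.emod_eq_of_lt hp0 hpn
  refine ⟨?_, ?_, ?_, ?_⟩
  · show (2 * ((g * n + p) / n) - (g * n + p) % n) % n = r
    rw [hdiv, hmod]
    exact pvEmodEq hr0 hrn ⟨(c - h + g) / n - (r + c - h) / n, by linarith⟩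
  · show (h - (g * n + p) / n + (g * n + p) % n) % n = c
    rw [hdiv, hmod]
    exact pvEmodEq hc0 hcn ⟨-((c - h + g) / n), by linarith⟩
  · rw [hinv]; positivity
  · rw [hinv]; nlinarith

lemma pvInv_pos (n k : Int) (hn : 0 < n) (hk0 : 0 ≤ k) (hkn : k < n * n) :
    pvInv n (pvPosR n k) (pvPosC n k) = k := by
  have hne : n ≠ 0 := by omega
  set h := n / 2 with hh
  set g := k / n with hgdef
  set p := k % n with hpdef
  have hp0 : 0 ≤ p := Int.emod_nonneg _ hne
  have hpn : p < n := Int.emod_lt_of_pos _ hn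
  have hg0 : 0 ≤ g := Int.ediv_nonneg hk0 (by omega)
  have hgn : g < n := by
    rw [hgdef]
    exact Int.ediv_lt_of_lt_mul hn (by linarith)
  have hr : pvPosR n k = (2 * g - p) - n * ((2 * g - p) / n) := by
    rw [pvPosR, Int.emod_def]
  have hc : pvPosC n k = (h - g + p) - n * ((h - g + p) / n) := by
    rw [pvPosC, Int.emod_def]
  have hk : g * n + p = k := by
    have := Int.mul_ediv_add_emod k n; linarith
  have hg' : (pvPosR n k + pvPosC n k - h) % n = g :=
    pvEmodEq hg0 hgn ⟨-((2 * g - p) / n) - (h - g + p) / n, by rw [hr, hc]; ring⟩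
  show (pvPosR n k + pvPosC n k - h) % n * n + (pvPosC n k - h + (pvPosR n k + pvPosC n k - h) % n) % n = k
  rw [hg']
  have hp' : (pvPosC n k - h + g) % n = p :=
    pvEmodEq hp0 hpn ⟨-((h - g + p) / n), by rw [hc]; ring⟩
  rw [hp', hk]

lemma pvPos_bounds (n k : Int) (hn : 0 < n) :
    0 ≤ pvPosR n k ∧ pvPosR n k < n ∧ 0 ≤ pvPosC n k ∧ pvPosC n k < n :=
  ⟨Int.emod_nonneg _ (by omega), Int.emod_lt_of_pos _ hn,
    Int.emod_nonneg _ (by omega), Int.emod_lt_of_pos _ hn⟩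

lemma pvEntry_set2 (n : Int) (hn : 0 < n) (m : List (List Int))
    (hlen : m.length = n.toNat) (hrow : ∀ row ∈ m, row.length = n.toNat)
    (r0 c0 r c v : Int) (h0 : 0 ≤ r0) (h1 : r0 < n) (h2 : 0 ≤ c0) (_h3 : c0 < n)
    (h4 : 0 ≤ r) (h5 : r < n) (h6 : 0 ≤ c) (h7 : c < n) :
    pvEntry (pvSet2 m r0 c0 v) r c = if r = r0 ∧ c = c0 then v else pvEntry m r c := by
  have hnn : ((n.toNat : Int)) = n := Int.toNat_of_nonneg hn.le
  have hmlen : (m.length : Int) = n := by rw [hlen, hnn]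
  have hr0m : r0.toNat < m.length := by omega
  have hrm : r.toNat < m.length := by omega
  have hrowr0 : PySem.List.pyGetD m r0 [] = m[r0.toNat] :=
    PySem.List.pyGetD_eq_getElem m [] h0 (by omega)
  have hrowr0len : (m[r0.toNat] : List Int).length = n.toNat := hrow _ (List.getElem_mem _)
  have hset : pvSet2 m r0 c0 v
      = m.set r0.toNat ((m[r0.toNat] : List Int).set c0.toNat v) := by
    rw [pvSet2, hrowr0, PySem.List.pySetD_of_nonneg _ _ h2, PySem.List.pySetD_of_nonneg _ _ h0]
  rw [pvEntry, hset]
  have hrow' : PySem.List.pyGetD (m.set r0.toNat ((m[r0.toNat] : List Int).set c0.toNat v)) r []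
      = (m.set r0.toNat ((m[r0.toNat] : List Int).set c0.toNat v))[r.toNat]'(by simpa using hrm) :=
    PySem.List.pyGetD_eq_getElem _ [] h4 (by simpa using (by omega : (r : Int) < m.length))
  rw [hrow', List.getElem_set]
  by_cases hrr : r = r0
  · have : r0.toNat = r.toNat := by omega
    rw [if_pos this]
    have hlen2 : ((m[r0.toNat] : List Int).set c0.toNat v).length = n.toNat := by
      simpa using hrowr0len
    rw [PySem.List.pyGetD_eq_getElem _ 0 h6 (by rw [hlen2]; omega), List.getElem_set]
    by_cases hcc : c = c0
    · rw [if_pos (by omega : c0.toNat = c.toNat), if_pos ⟨hrr, hcc⟩]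
    · rw [if_neg (by omega : ¬ c0.toNat = c.toNat), if_neg (by tauto)]
      rw [pvEntry, PySem.List.pyGetD_eq_getElem m [] h4 (by omega),
        PySem.List.pyGetD_eq_getElem _ 0 h6 (by rw [hrow _ (List.getElem_mem _)]; omega)]
      simp only [show r.toNat = r0.toNat by omega]
  · rw [if_neg (by omega : ¬ r0.toNat = r.toNat), if_neg (by tauto)]
    rw [pvEntry, PySem.List.pyGetD_eq_getElem m [] h4 (by omega),
      PySem.List.pyGetD_eq_getElem _ 0 h6 (by rw [hrow _ (List.getElem_mem _)]; omega)]

lemma pvSet2_shape (n : Int) (hn : 0 < n) (m : List (List Int))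
    (hlen : m.length = n.toNat) (hrow : ∀ row ∈ m, row.length = n.toNat)
    (r0 c0 v : Int) (h0 : 0 ≤ r0) (h1 : r0 < n) (h2 : 0 ≤ c0) :
    (pvSet2 m r0 c0 v).length = n.toNat ∧ ∀ row ∈ pvSet2 m r0 c0 v, row.length = n.toNat := by
  rw [pvSet2, PySem.List.pySetD_of_nonneg _ _ h0]
  refine ⟨by simpa using hlen, fun row hr => ?_⟩
  rcases List.mem_or_eq_of_mem_set hr with h | h
  · exact hrow _ h
  · subst h
    rw [PySem.List.pySetD_of_nonneg _ _ h2, List.length_set]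
    have hnn : ((n.toNat : Int)) = n := Int.toNat_of_nonneg hn.le
    have hmlen : (m.length : Int) = n := by rw [hlen, hnn]
    exact hrow _ (by rw [PySem.List.pyGetD_eq_getElem m [] h0 (by omega)]; exact List.getElem_mem _)

lemma pvZeros_shape (n : Int) :
    ((PySem.List.pyRange 0 n 1).map (fun _ => List.replicate n.toNat (0 : Int))).length = n.toNat ∧
    ∀ row ∈ (PySem.List.pyRange 0 n 1).map (fun _ => List.replicate n.toNat (0 : Int)),
      row.length = n.toNat := by
  constructor
  · rw [List.length_map, PySem.List.length_pyRange_one]; norm_num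
  · intro row hr
    rcases List.mem_map.1 hr with ⟨_, _, h⟩
    rw [← h, List.length_replicate]

lemma pvGrid_succ (n : Int) (k : Nat) :
    pvGrid n (k + 1) = pvStepB n (pvGrid n k) (k : Int) := by
  have h : PySem.List.pyRange 0 ((k : Int) + 1) 1
      = PySem.List.pyRange 0 (k : Int) 1 ++ [(k : Int)] :=
    PySem.List.pyRange_one_succ_right (by positivity)
  simp only [pvGrid, Nat.cast_add, Nat.cast_one, h, List.foldl_append, List.foldl_cons, List.foldl_nil]

lemma pvGrid_shape (n : Int) (hn : 0 < n) (k : Nat) :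
    (pvGrid n k).length = n.toNat ∧ ∀ row ∈ pvGrid n k, row.length = n.toNat := by
  induction k with
  | zero =>
    have h0 : PySem.List.pyRange 0 ((0 : Nat) : Int) 1 = [] := by
      rw [Nat.cast_zero]; exact PySem.List.pyRange_one_eq_nil (by norm_num)
    rw [pvGrid, h0, List.foldl_nil]
    exact pvZeros_shape n
  | succ k ih =>
    rw [pvGrid_succ, pvStepB_eq n _ hn]
    obtain ⟨b1, b2, b3, _⟩ := pvPos_bounds n (k : Int) hn
    exact pvSet2_shape n hn _ ih.1 ih.2 _ _ _ b1 b2 b3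

lemma pvGrid_entry (n : Int) (hn : 0 < n) (k : Nat) (hk : (k : Int) ≤ n * n)
    (r c : Int) (hr0 : 0 ≤ r) (hrn : r < n) (hc0 : 0 ≤ c) (hcn : c < n) :
    pvEntry (pvGrid n k) r c = if pvInv n r c < (k : Int) then pvInv n r c + 1 else 0 := by
  induction k with
  | zero =>
    have h0 : PySem.List.pyRange 0 ((0 : Nat) : Int) 1 = [] := by
      rw [Nat.cast_zero]; exact PySem.List.pyRange_one_eq_nil (by norm_num)
    rw [pvGrid, h0, List.foldl_nil]
    obtain ⟨_, _, hinv0, _⟩ := pvPos_inv n r c hn hr0 hrn hc0 hcn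
    rw [if_neg (by omega)]
    have hnn : ((n.toNat : Int)) = n := Int.toNat_of_nonneg hn.le
    have hlen : ((PySem.List.pyRange 0 n 1).map
        (fun _ => List.replicate n.toNat (0 : Int))).length = n.toNat := (pvZeros_shape n).1
    rw [pvEntry, PySem.List.pyGetD_eq_getElem _ [] hr0 (by rw [hlen]; omega)]
    rw [List.getElem_map]
    rw [PySem.List.pyGetD_eq_getElem _ 0 hc0 (by rw [List.length_replicate]; omega)]
    exact List.getElem_replicate _
  | succ k ih =>
    have hk' : (k : Int) ≤ n * n := by push_cast at hk ⊢; omega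
    have hkk : (k : Int) < n * n := by push_cast at hk ⊢; omega
    rw [pvGrid_succ, pvStepB_eq n _ hn]
    obtain ⟨b1, b2, b3, b4⟩ := pvPos_bounds n (k : Int) hn
    rw [pvEntry_set2 n hn _ (pvGrid_shape n hn k).1 (pvGrid_shape n hn k).2 _ _ _ _ _
      b1 b2 b3 b4 hr0 hrn hc0 hcn]
    by_cases heq : r = pvPosR n (k : Int) ∧ c = pvPosC n (k : Int)
    · rw [if_pos heq, heq.1, heq.2, pvInv_pos n (k : Int) hn (by positivity) hkk]
      rw [if_pos (by push_cast; omega)]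
    · rw [if_neg heq, ih hk']
      have hne : pvInv n r c ≠ (k : Int) := by
        intro hcon
        obtain ⟨e1, e2, _, _⟩ := pvPos_inv n r c hn hr0 hrn hc0 hcn
        rw [hcon] at e1 e2
        exact heq ⟨e1.symm, e2.symm⟩
      by_cases hlt : pvInv n r c < (k : Int)
      · rw [if_pos hlt, if_pos (by push_cast; omega)]
      · rw [if_neg hlt, if_neg (by push_cast at hlt ⊢; omega)]










lemma pvEmodCongr {n a b : Int} (h : n ∣ a - b) : a % n = b % n := by
  obtain ⟨t, ht⟩ := h
  have : a = b + n * t := by linarith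
  subst this
  rw [Int.add_mul_emod_self_left]

lemma pvMain (n : Int) (hn : 0 < n) (k : Nat) (hk : (k : Int) ≤ n * n) :
    ((PySem.List.pyRange 1 ((k : Int) + 1) 1).foldl (pvStepA n)
      ((PySem.List.pyRange 0 n 1).map (fun _ => (PySem.List.pyRange 0 n 1).map (fun _ => (0 : Int))),
        0, PySem.Int.floordiv n 2)).1 = pvGrid n k ∧
    ((k : Int) < n * n →
      ((PySem.List.pyRange 1 ((k : Int) + 1) 1).foldl (pvStepA n)
        ((PySem.List.pyRange 0 n 1).map (fun _ => (PySem.List.pyRange 0 n 1).map (fun _ => (0 : Int))),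
          0, PySem.Int.floordiv n 2)).2 = (pvPosR n (k : Int), pvPosC n (k : Int))) := by
  have hne : n ≠ 0 := by omega
  have hzeros : (PySem.List.pyRange 0 n 1).map (fun _ => (PySem.List.pyRange 0 n 1).map (fun _ => (0 : Int)))
      = (PySem.List.pyRange 0 n 1).map (fun _ => List.replicate n.toNat (0 : Int)) := by
    have hrow : (PySem.List.pyRange 0 n 1).map (fun _ => (0 : Int)) = List.replicate n.toNat (0 : Int) := by
      rw [List.map_const', PySem.List.length_pyRange_one]
      norm_num
    simp only [hrow]
  induction k with
  | zero =>
    have h0 : PySem.List.pyRange 1 (((0 : Nat) : Int) + 1) 1 = [] := by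
      rw [Nat.cast_zero, zero_add]
      exact PySem.List.pyRange_one_eq_nil (by norm_num)
    rw [h0, List.foldl_nil]
    constructor
    · show _ = pvGrid n 0
      rw [pvGrid]
      have h0' : PySem.List.pyRange 0 ((0 : Nat) : Int) 1 = [] := by
        rw [Nat.cast_zero]
        exact PySem.List.pyRange_one_eq_nil (by norm_num)
      rw [h0', List.foldl_nil]
      exact hzeros
    · intro _
      show (0, PySem.Int.floordiv n 2) = _
      have hR : pvPosR n ((0 : Nat) : Int) = 0 := by
        simp [pvPosR]
      have hC : pvPosC n ((0 : Nat) : Int) = n / 2 := by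
        rw [pvPosC]
        norm_num
        exact Int.emod_eq_of_lt (Int.ediv_nonneg hn.le (by norm_num)) (by omega)
      rw [hR, hC, PySem.Int.floordiv_eq_ediv_of_pos (show (0:Int) < 2 by norm_num)]
  | succ k ih =>
    have hk1 : ((k : Int)) + 1 ≤ n * n := by push_cast at hk; omega
    have hklt : ((k : Int)) < n * n := by omega
    obtain ⟨ih1, ih2⟩ := ih (by omega)
    have hrc := ih2 hklt
    have hsplit : PySem.List.pyRange 1 (((k + 1 : Nat) : Int) + 1) 1
        = PySem.List.pyRange 1 ((k : Int) + 1) 1 ++ [(k : Int) + 1] := by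
      push_cast
      exact PySem.List.pyRange_one_succ_right (by omega)
    have hst : (PySem.List.pyRange 1 ((k : Int) + 1) 1).foldl (pvStepA n)
        ((PySem.List.pyRange 0 n 1).map (fun _ => (PySem.List.pyRange 0 n 1).map (fun _ => (0 : Int))),
          0, PySem.Int.floordiv n 2)
        = (pvGrid n k, pvPosR n (k : Int), pvPosC n (k : Int)) := Prod.ext ih1 hrc
    rw [hsplit, List.foldl_append, List.foldl_cons, List.foldl_nil, hst]
    -- arithmetic context
    have hg0 : 0 ≤ (k : Int) / n := Int.ediv_nonneg (by positivity) hn.le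
    have hgn : (k : Int) / n < n := Int.ediv_lt_of_lt_mul hn (by linarith)
    have hp0 : 0 ≤ (k : Int) % n := Int.emod_nonneg _ hne
    have hpn : (k : Int) % n < n := Int.emod_lt_of_pos _ hn
    set g := (k : Int) / n with hgdef
    set p := (k : Int) % n with hpdef
    have hgp : g * n + p = (k : Int) := by
      have := Int.mul_ediv_add_emod (k : Int) n; linarith
    have hR : pvPosR n (k : Int) = (2 * g - p) % n := by rw [pvPosR]
    have hC : pvPosC n (k : Int) = (n / 2 - g + p) % n := by rw [pvPosC]
    have hR' : pvPosR n (k : Int) = (2 * g - p) - n * ((2 * g - p) / n) := by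
      rw [hR, Int.emod_def]
    have hC' : pvPosC n (k : Int) = (n / 2 - g + p) - n * ((n / 2 - g + p) / n) := by
      rw [hC, Int.emod_def]
    obtain ⟨hb1, hb2, hb3, hb4⟩ := pvPos_bounds n (k : Int) hn
    set R := pvPosR n (k : Int) with hRdef
    set C := pvPosC n (k : Int) with hCdef
    set qR := (2 * g - p) / n with hqRdef
    set qC := (n / 2 - g + p) / n with hqCdef
    -- the two wrap-around adjustments are exactly mod n
    have hra : (if R - 1 < 0 then n - 1 else R - 1) = (R - 1) % n := by
      by_cases h : R - 1 < 0
      · rw [if_pos h]; symm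
        exact pvEmodEq (by omega) (by omega) ⟨-1, by omega⟩
      · rw [if_neg h]; symm
        exact pvEmodEq (by omega) (by omega) ⟨0, by ring⟩
    have hca : (if C + 1 > n - 1 then 0 else C + 1) = (C + 1) % n := by
      by_cases h : C + 1 > n - 1
      · rw [if_pos h]; symm
        exact pvEmodEq (by omega) (by omega) ⟨1, by omega⟩
      · rw [if_neg h]; symm
        exact pvEmodEq (by omega) (by omega) ⟨0, by ring⟩
    have hm : pvSet2 (pvGrid n k) R C ((k : Int) + 1) = pvGrid n (k + 1) := by
      rw [pvGrid_succ, pvStepB_eq n _ hn]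
    have hra0 : 0 ≤ (R - 1) % n := Int.emod_nonneg _ hne
    have hran : (R - 1) % n < n := Int.emod_lt_of_pos _ hn
    have hca0 : 0 ≤ (C + 1) % n := Int.emod_nonneg _ hne
    have hcan : (C + 1) % n < n := Int.emod_lt_of_pos _ hn
    simp only [pvStepA, hra, hca, hm]
    rcases (by omega : p = n - 1 ∨ p < n - 1) with hcase | hcase
    · -- end of a diagonal: the cell below-right is occupied (by g*n+1); move down
      have hsdiv : g * n / n = g := Int.mul_ediv_cancel _ hne
      have hsmod : g * n % n = 0 := Int.mul_emod_left g n
      have hraeq : (R - 1) % n = pvPosR n (g * n) := by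
        rw [pvPosR, hsdiv, hsmod]
        exact pvEmodCongr ⟨-1 - qR, by rw [hR']; ring_nf; linarith⟩
      have hcaeq : (C + 1) % n = pvPosC n (g * n) := by
        rw [pvPosC, hsdiv, hsmod]
        exact pvEmodCongr ⟨1 - qC, by rw [hC']; ring_nf; linarith⟩
      have hs0 : (0 : Int) ≤ g * n := by positivity
      have hsn : g * n < n * n := by nlinarith
      have hinv : pvInv n ((R - 1) % n) ((C + 1) % n) = g * n := by
        rw [hraeq, hcaeq]
        exact pvInv_pos n (g * n) hn hs0 hsn
      have hval : pvEntry (pvGrid n (k + 1)) ((R - 1) % n) ((C + 1) % n) = g * n + 1 := by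
        rw [pvGrid_entry n hn (k + 1) (by push_cast; omega) _ _ hra0 hran hca0 hcan, hinv,
          if_pos (by push_cast; linarith)]
      rw [show PySem.List.pyGetD (PySem.List.pyGetD (pvGrid n (k + 1)) ((R - 1) % n) []) ((C + 1) % n) 0
          = pvEntry (pvGrid n (k + 1)) ((R - 1) % n) ((C + 1) % n) from rfl, hval,
        if_pos (by linarith : g * n + 1 ≠ 0)]
      refine ⟨rfl, fun hlt => ?_⟩
      push_cast at hlt ⊢
      have hdivk1 : ((k : Int) + 1) / n = g + 1 := by
        rw [show (k : Int) + 1 = (g + 1) * n by linarith, Int.mul_ediv_cancel _ hne]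
      have hmodk1 : ((k : Int) + 1) % n = 0 := by
        rw [show (k : Int) + 1 = (g + 1) * n by linarith]
        exact Int.mul_emod_left _ _
      have hrow' : (if R + 1 > n - 1 then 0 else R + 1) = (R + 1) % n := by
        by_cases h : R + 1 > n - 1
        · rw [if_pos h]; symm
          exact pvEmodEq (by omega) (by omega) ⟨1, by omega⟩
        · rw [if_neg h]; symm
          exact pvEmodEq (by omega) (by omega) ⟨0, by ring⟩
      have hrow2 : (R + 1) % n = pvPosR n ((k : Int) + 1) := by
        rw [pvPosR, hdivk1, hmodk1]
        exact pvEmodCongr ⟨-1 - qR, by rw [hR']; ring_nf; linarith⟩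
      have hcol2 : C = pvPosC n ((k : Int) + 1) := by
        rw [pvPosC, hdivk1, hmodk1]
        rw [hC]
        exact (pvEmodCongr ⟨-1, by ring_nf; linarith⟩).symm
      rw [hrow', hrow2, hcol2]
    · -- still on the diagonal: the target cell is empty; move up-right
      have hk1' : (k : Int) + 1 = (p + 1) + g * n := by linarith
      have hdivk1 : ((k : Int) + 1) / n = g := by
        rw [hk1', Int.add_mul_ediv_right _ _ hne, Int.ediv_eq_zero_of_lt (by omega) (by omega), zero_add]
      have hmodk1 : ((k : Int) + 1) % n = p + 1 := by
        rw [hk1', Int.add_mul_emod_self_right]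
        exact Int.emod_eq_of_lt (by omega) (by omega)
      have hraeq : (R - 1) % n = pvPosR n ((k : Int) + 1) := by
        rw [pvPosR, hdivk1, hmodk1]
        exact pvEmodCongr ⟨-qR, by rw [hR']; ring_nf⟩
      have hcaeq : (C + 1) % n = pvPosC n ((k : Int) + 1) := by
        rw [pvPosC, hdivk1, hmodk1]
        exact pvEmodCongr ⟨-qC, by rw [hC']; ring_nf⟩
      have hgln : g * n ≤ (n - 1) * n := mul_le_mul_of_nonneg_right (by omega) hn.le
      have hk1lt : (k : Int) + 1 < n * n := by nlinarith
      have hinv : pvInv n ((R - 1) % n) ((C + 1) % n) = (k : Int) + 1 := by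
        rw [hraeq, hcaeq]
        exact pvInv_pos n ((k : Int) + 1) hn (by positivity) hk1lt
      have hval : pvEntry (pvGrid n (k + 1)) ((R - 1) % n) ((C + 1) % n) = 0 := by
        rw [pvGrid_entry n hn (k + 1) (by push_cast; omega) _ _ hra0 hran hca0 hcan, hinv,
          if_neg (by push_cast; omega)]
      rw [show PySem.List.pyGetD (PySem.List.pyGetD (pvGrid n (k + 1)) ((R - 1) % n) []) ((C + 1) % n) 0
          = pvEntry (pvGrid n (k + 1)) ((R - 1) % n) ((C + 1) % n) from rfl, hval,
        if_neg (by omega : ¬ (0 : Int) ≠ 0)]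
      refine ⟨rfl, fun _ => ?_⟩
      push_cast
      rw [hraeq, hcaeq]

-- ===== VERDICT (by name: the statement is the Claim_ definition above) =====
theorem magic_square_spec : Claim_equal_magic_square := by
  intro n _ hpre
  unfold Spec_magic_square
  rcases eq_or_lt_of_le hpre with h0 | hn
  · subst h0; decide
  · have hsq : n ^ 2 = n * n := by ring
    have hK : ((n * n).toNat : Int) = n * n := Int.toNat_of_nonneg (by positivity)
    have := (pvMain n hn (n * n).toNat (by rw [hK])).1
    unfold magic_square magic_square_alt
    simp only [hsq, hK] at this ⊢
    rw [this]
    unfold pvGrid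
    rw [hK]
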